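-- pv_equiv track=rewrite | github.com/Bparsons0904/NFL-Scheduler | nfl.py | divisional
-- ===== SOURCE A (Python) =====
-- def divisional(div):
--     divSchedule = []
--     for away in div:
--         for home in div:
--             if away != home:
--                 test = [away,home]
--                 if test not in divSchedule:
--                     divSchedule.append(test)
--     return divSchedule
-- ===== SOURCE B (Python) =====
-- def divisional(div):
--     # Stage 1: first-occurrence dedup of the teams (list membership, not a set,
--     # so behaviour is unchanged for unhashable elements).
--     unique = []
--     for x in div:
--         if x not in unique:
--             unique.append(x)
--     # Stage 2: one comprehension emits every ordered pair of distinct unique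
--     # teams directly; no per-pair membership scan is needed.
--     return [[away, home] for away in unique for home in unique if away != home]
-- ===== Notes on version B (the rewrite author's own statement) =====
-- stated objective: faster
-- what changed: B dedups the teams in one pre-pass and then emits the ordered distinct pairs of unique teams with a single comprehension (filter+map over the unique list), eliminating A's per-pair membership scan of the growing schedule list.
import Mathlib
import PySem

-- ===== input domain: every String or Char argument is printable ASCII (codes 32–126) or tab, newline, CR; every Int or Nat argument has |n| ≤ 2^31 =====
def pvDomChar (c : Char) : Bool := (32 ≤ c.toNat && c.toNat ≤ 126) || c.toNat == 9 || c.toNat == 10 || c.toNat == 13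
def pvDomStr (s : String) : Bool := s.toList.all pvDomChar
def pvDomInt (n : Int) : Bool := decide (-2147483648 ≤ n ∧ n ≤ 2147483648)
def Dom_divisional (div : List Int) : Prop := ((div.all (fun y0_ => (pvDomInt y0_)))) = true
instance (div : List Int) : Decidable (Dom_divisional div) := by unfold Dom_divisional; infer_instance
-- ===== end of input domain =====

-- B dedups the teams in one pre-pass and then emits the ordered distinct pairs
-- with a single comprehension (filter+map), removing A's per-pair membership scan.

-- ===== PORT A =====
def divisional (div : List Int) : List (List Int) :=
  div.foldl (fun acc away =>
    div.foldl (fun acc2 home =>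
      if away ≠ home then
        if [away, home] ∉ acc2 then acc2 ++ [[away, home]] else acc2
      else acc2) acc) []

-- ===== PORT B =====
def divisional_alt (div : List Int) : List (List Int) :=
  let unique := div.foldl (fun u x => if x ∉ u then u ++ [x] else u) []
  unique.flatMap (fun away =>
    (unique.filter (fun home => decide (away ≠ home))).map (fun home => [away, home]))

-- ===== PRECONDITION & SPEC =====
def Spec_divisional (div : List Int) (out : List (List Int)) : Prop := out = divisional_alt div
instance (div : List Int) (out : List (List Int)) : Decidable (Spec_divisional div out) := by unfold Spec_divisional; infer_instance

-- ===== CLAIM (what is proved, stated in full; the proofs are below) =====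
def Claim_equal_divisional : Prop := ∀ (div : List Int), Dom_divisional div → Spec_divisional div (divisional div)

-- ===== LEMMAS AND PROOFS =====

-- first-occurrence dedup of l, skipping elements of `seen`
def duniqS (seen : List Int) : List Int → List Int
  | [] => []
  | h :: t => if h ∈ seen then duniqS seen t else h :: duniqS (h :: seen) t

-- first-occurrence dedup of the elements of l satisfying the (shrinking) predicate p
def duniqP (p : Int → Bool) : List Int → List Int
  | [] => []
  | h :: t => if p h then h :: duniqP (fun x => p x && decide (x ≠ h)) t else duniqP p t

-- the block of pairs produced for one away-team a
def blk (u : List Int) (a : Int) : List (List Int) :=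
  (u.filter (fun h => decide (a ≠ h))).map (fun h => [a, h])

lemma duniqS_congr (s1 s2 l : List Int) (h : ∀ x, x ∈ s1 ↔ x ∈ s2) :
    duniqS s1 l = duniqS s2 l := by
  induction l generalizing s1 s2 with
  | nil => rfl
  | cons a t ih =>
    simp only [duniqS]
    by_cases ha : a ∈ s1
    · rw [if_pos ha, if_pos ((h a).1 ha), ih s1 s2 h]
    · rw [if_neg ha, if_neg (fun hh => ha ((h a).2 hh))]
      refine congrArg _ (ih _ _ ?_)
      intro x; simp [List.mem_cons, h x]

lemma mem_duniqS (x : Int) (seen l : List Int) :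
    x ∈ duniqS seen l ↔ x ∈ l ∧ x ∉ seen := by
  induction l generalizing seen with
  | nil => simp [duniqS]
  | cons a t ih =>
    simp only [duniqS]
    by_cases ha : a ∈ seen
    · rw [if_pos ha, ih]
      simp only [List.mem_cons]
      constructor
      · exact fun ⟨h1, h2⟩ => ⟨Or.inr h1, h2⟩
      · rintro ⟨rfl | h1, h2⟩
        · exact absurd ha h2
        · exact ⟨h1, h2⟩
    · rw [if_neg ha]
      simp only [List.mem_cons, ih]
      constructor
      · rintro (rfl | ⟨h1, h2⟩)
        · exact ⟨Or.inl rfl, ha⟩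
        · simp only [not_or] at h2
          exact ⟨Or.inr h1, h2.2⟩
      · rintro ⟨rfl | h1, h2⟩
        · exact Or.inl rfl
        · by_cases hx : x = a
          · exact Or.inl hx
          · exact Or.inr ⟨h1, by simp [hx, h2]⟩

lemma duniqP_nil (p : Int → Bool) (l : List Int) (h : ∀ x ∈ l, p x = false) :
    duniqP p l = [] := by
  induction l generalizing p with
  | nil => rfl
  | cons a t ih =>
    simp only [duniqP]
    rw [if_neg (by simp [h a (List.mem_cons_self)]), ih]
    exact fun x hx => h x (List.mem_cons_of_mem _ hx)

lemma duniqP_filter (a : Int) (seen l : List Int) :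
    duniqP (fun x => decide (x ∉ seen) && decide (a ≠ x)) l
      = (duniqS seen l).filter (fun h => decide (a ≠ h)) := by
  induction l generalizing seen with
  | nil => rfl
  | cons h t ih =>
    simp only [duniqP, duniqS]
    by_cases hs : h ∈ seen
    · rw [if_neg (by simp [hs]), if_pos hs, ih]
    · rw [if_neg hs]
      by_cases hah : a = h
      · subst hah
        rw [if_neg (by simp)]
        simp only [List.filter_cons, decide_eq_true_eq]
        rw [if_neg (by simp), ← ih (a :: seen)]
        refine congrFun (congrArg _ ?_) t
        funext x
        by_cases hx : x = a <;> by_cases hxs : x ∈ seen <;> simp [hx, hxs]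
      · rw [if_pos (by simp [hs, hah])]
        simp only [List.filter_cons, decide_eq_true_eq]
        rw [if_pos hah, ← ih (h :: seen)]
        refine congrArg _ ?_
        refine congrFun (congrArg _ ?_) t
        funext x
        by_cases hx : x = h <;> by_cases hxs : x ∈ seen <;> simp [hx, hxs]

lemma innerA (a : Int) (l : List Int) (acc : List (List Int)) :
    l.foldl (fun acc2 home =>
      if a ≠ home then
        if [a, home] ∉ acc2 then acc2 ++ [[a, home]] else acc2
      else acc2) acc
    = acc ++ (duniqP (fun h => decide (a ≠ h) && decide ([a, h] ∉ acc)) l).map (fun h => [a, h]) := by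
  induction l generalizing acc with
  | nil => simp [duniqP]
  | cons h t ih =>
    simp only [List.foldl_cons, duniqP]
    by_cases hah : a ≠ h
    · by_cases hm : [a, h] ∈ acc
      · rw [if_pos hah, if_neg (by simp [hm]), if_neg (by simp [hm]), ih]
      · rw [if_pos hah, if_pos hm, if_pos (by simp [hah, hm]), ih]
        simp only [List.map_cons]
        rw [List.append_assoc]
        refine congrArg _ ?_
        simp only [List.singleton_append]
        refine congrArg _ (congrArg _ ?_)
        refine congrFun (congrArg _ ?_) t
        funext x
        by_cases hx : x = h <;>
          by_cases hxa : a = x <;>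
            by_cases hxm : [a, x] ∈ acc <;>
              simp [hx, hxa, hxm, List.mem_append]
    · rw [if_neg hah, if_neg (by simp [hah]), ih]

lemma mem_flatMap_blk (u : List Int) (S : List Int) (a h : Int) :
    [a, h] ∈ S.flatMap (blk u) ↔ a ∈ S ∧ h ∈ u ∧ a ≠ h := by
  simp only [List.mem_flatMap, blk, List.mem_map, List.mem_filter, decide_eq_true_eq]
  constructor
  · rintro ⟨b, hb, x, ⟨hxu, hbx⟩, hx⟩
    simp only [List.cons.injEq, and_true] at hx
    obtain ⟨rfl, rfl⟩ := hx
    exact ⟨hb, hxu, hbx⟩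
  · rintro ⟨ha, hu, hne⟩
    exact ⟨a, ha, h, ⟨hu, hne⟩, rfl⟩

lemma outerA (div : List Int) (l S : List Int) :
    l.foldl (fun acc away =>
      div.foldl (fun acc2 home =>
        if away ≠ home then
          if [away, home] ∉ acc2 then acc2 ++ [[away, home]] else acc2
        else acc2) acc) (S.flatMap (blk (duniqS [] div)))
    = (S ++ duniqS S l).flatMap (blk (duniqS [] div)) := by
  induction l generalizing S with
  | nil => simp [duniqS]
  | cons a t ih =>
    simp only [List.foldl_cons, duniqS]
    rw [innerA]
    by_cases hS : a ∈ S
    · rw [if_pos hS]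
      rw [duniqP_nil _ div ?hzero]
      · simpa using ih S
      case hzero =>
        intro x hx
        by_cases hax : a = x
        · simp [hax]
        · have hxu : x ∈ duniqS [] div := (mem_duniqS x [] div).2 ⟨hx, by simp⟩
          simp [hax, (mem_flatMap_blk _ S a x).2 ⟨hS, hxu, hax⟩]
    · rw [if_neg hS]
      have hp : (fun h => decide (a ≠ h) && decide ([a, h] ∉ S.flatMap (blk (duniqS [] div))))
          = fun x => decide (x ∉ ([] : List Int)) && decide (a ≠ x) := by
        funext x
        by_cases hax : a = x
        · simp [hax]
        · have hnm : [a, x] ∉ S.flatMap (blk (duniqS [] div)) :=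
            fun hmem => hS ((mem_flatMap_blk _ _ _ _).1 hmem).1
          simp [hax, hnm]
      rw [hp, duniqP_filter a [] div]
      have hblk : (((duniqS [] div).filter (fun h => decide (a ≠ h))).map fun h => [a, h])
          = blk (duniqS [] div) a := rfl
      rw [hblk]
      have hstep : S.flatMap (blk (duniqS [] div)) ++ blk (duniqS [] div) a
          = (S ++ [a]).flatMap (blk (duniqS [] div)) := by
        simp [List.flatMap_append]
      rw [hstep, ih (S ++ [a])]
      rw [duniqS_congr (S ++ [a]) (a :: S) t (by intro x; simp [or_comm])]
      simp

lemma dedup_foldl (l acc : List Int) :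
    l.foldl (fun u x => if x ∉ u then u ++ [x] else u) acc = acc ++ duniqS acc l := by
  induction l generalizing acc with
  | nil => simp [duniqS]
  | cons h t ih =>
    simp only [List.foldl_cons, duniqS]
    by_cases hm : h ∈ acc
    · rw [if_neg (by simp [hm]), if_pos hm, ih]
    · rw [if_pos hm, if_neg hm, ih, duniqS_congr (acc ++ [h]) (h :: acc) t (by intro x; simp [or_comm])]
      simp

-- ===== VERDICT (by name: the statement is the Claim_ definition above) =====
theorem divisional_spec : Claim_equal_divisional := by
  intro div _
  unfold Spec_divisional divisional divisional_alt
  have hA := outerA div div []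
  simp only [List.flatMap_nil, List.nil_append] at hA
  rw [hA, dedup_foldl div []]
  simp only [List.nil_append]
  rfl
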